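-- pv_equiv track=rewrite | github.com/kenshi777/infa_2022-2023 | contests_2/path.py | bfs
-- ===== SOURCE A (Python) =====
-- from queue import Queue
--
-- def bfs(G, start):
--     path = {v: None for v in G}
--     q = Queue()
--     q.put(start)
--     path[start] = ['A']
--
--     while not q.empty():
--         v = q.get()
--         for neighbour in G[v]:
--             if path[neighbour] is None:
--                 q.put(neighbour)
--                 path[neighbour] = path[v] + [neighbour]
--     return path
-- ===== SOURCE B (Python) =====
-- from collections import deque
--
-- def bfs(G, start):
--     parent = {start: None}
--     q = deque([start])
--     while q:
--         v = q.popleft()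
--         for n in G[v]:
--             if n not in parent:
--                 parent[n] = v
--                 q.append(n)
--     res = {}
--     for v in G:
--         if v in parent:
--             p = []
--             u = v
--             while u is not None:
--                 p.append(u)
--                 u = parent[u]
--             p.reverse()
--             res[v] = ['A'] + p[1:]
--         else:
--             res[v] = None
--     return res
-- ===== Notes on version B (the rewrite author's own statement) =====
-- stated objective: alternative
-- what changed: B runs BFS keeping only a parent pointer per discovered vertex (collections.deque instead of queue.Queue) and reconstructs each path once at the end by walking parents back to the start, instead of A's copying of a growing path list into every newly discovered vertex.
import Mathlib
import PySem

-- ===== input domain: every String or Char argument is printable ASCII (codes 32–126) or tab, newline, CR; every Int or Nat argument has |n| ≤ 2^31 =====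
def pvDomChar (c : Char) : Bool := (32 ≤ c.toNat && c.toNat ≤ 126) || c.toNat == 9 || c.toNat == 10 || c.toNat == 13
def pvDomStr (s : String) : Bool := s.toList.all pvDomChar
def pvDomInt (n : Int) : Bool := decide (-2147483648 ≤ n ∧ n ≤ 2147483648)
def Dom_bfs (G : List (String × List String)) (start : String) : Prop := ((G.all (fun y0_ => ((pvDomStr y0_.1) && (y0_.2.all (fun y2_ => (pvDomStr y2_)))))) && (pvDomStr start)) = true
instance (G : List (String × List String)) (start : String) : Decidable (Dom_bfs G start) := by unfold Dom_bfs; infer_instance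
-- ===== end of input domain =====

-- B replaces A's per-vertex path-list accumulation by a parent-pointer BFS with path reconstruction (alternative decomposition; return value only).


-- ===== PORT A =====
-- one BFS step of A over one neighbour n: 'if path[neighbour] is None: enqueue; path[neighbour] = path[v] + [neighbour]'
-- (path[x] on a missing key is Python's KeyError; that case is excluded by Pre_bfs, the '| _' arm is then unreachable for absent keys)
def bfsStepA (v : String) (s : List String × PySem.Dict String (Option (List String))) (n : String) :
    List String × PySem.Dict String (Option (List String)) :=
  match s.2.get? n with
  | some none => (s.1 ++ [n], s.2.insert n (some ((((s.2.get? v).getD none).getD []) ++ [n])))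
  | _ => s

-- A's 'while not q.empty()' loop; fuel is a totality guard only (under Pre_bfs it never runs out: each
-- dequeued vertex was enqueued exactly once, and at most one vertex per key of G is ever enqueued)
def bfsLoopA (g : PySem.Dict String (List String)) :
    Nat → List String → PySem.Dict String (Option (List String)) → PySem.Dict String (Option (List String))
  | 0, _, path => path
  | _ + 1, [], path => path
  | fuel + 1, v :: q, path =>
    let s := (g.getD v []).foldl (bfsStepA v) (q, path)
    bfsLoopA g fuel s.1 s.2

def bfs (G : List (String × List String)) (start : String) : List (String × Option (List String)) :=
  let g := PySem.Dict.ofList G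
  let path0 := g.keys.foldl (fun p v => p.insert v (none : Option (List String))) PySem.Dict.empty
  (bfsLoopA g (G.length + 1) [start] (path0.insert start (some ["A"]))).items

-- ===== PORT B =====
-- B's 'for n in G[v]: if n not in parent: parent[n] = v; q.append(n)'
def bfsStepB (v : String) (s : List String × PySem.Dict String (Option String)) (n : String) :
    List String × PySem.Dict String (Option String) :=
  if (s.2.get? n).isSome then s else (s.1 ++ [n], s.2.insert n (some v))

-- B's 'while q' loop (fuel = totality guard, never exhausted under Pre_bfs, as for A)
def bfsLoopB (g : PySem.Dict String (List String)) :
    Nat → List String → PySem.Dict String (Option String) → PySem.Dict String (Option String)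
  | 0, _, par => par
  | _ + 1, [], par => par
  | fuel + 1, v :: q, par =>
    let s := (g.getD v []).foldl (bfsStepB v) (q, par)
    bfsLoopB g fuel s.1 s.2

-- B's 'while u is not None: p.append(u); u = parent[u]' walk (fuel = totality guard: the parent
-- chain of a discovered vertex is strictly shorter than the fuel used below)
def bfsWalk (par : PySem.Dict String (Option String)) : Nat → String → List String
  | 0, _ => []
  | fuel + 1, u =>
    match par.get? u with
    | some (some p) => u :: bfsWalk par fuel p
    | _ => [u]

def bfs_alt (G : List (String × List String)) (start : String) : List (String × Option (List String)) :=
  let g := PySem.Dict.ofList G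
  let F := G.length + 1
  let par := bfsLoopB g F [start] (PySem.Dict.empty.insert start none)
  (g.keys.foldl (fun res v => res.insert v
      (if (par.get? v).isSome then some ("A" :: ((bfsWalk par F v).reverse.drop 1)) else none))
    PySem.Dict.empty).items

-- ===== PRECONDITION & SPEC =====
-- Pre_bfs excludes inputs where start, or some neighbour listed under a key of G, is not itself a key of G:
-- on those A raises KeyError, except when every such missing neighbour is unreachable from start, where A
-- still returns — reachability is not a closed-form condition, so Pre_ is stated by membership only.
def Pre_bfs (G : List (String × List String)) (start : String) : Prop :=
  start ∈ (PySem.Dict.ofList G).keys ∧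
  ∀ p ∈ (PySem.Dict.ofList G).items, ∀ n ∈ p.2, n ∈ (PySem.Dict.ofList G).keys
instance (G : List (String × List String)) (start : String) : Decidable (Pre_bfs G start) := by
  unfold Pre_bfs; infer_instance

def pvWitness_bfs : (List (String × List String)) × String :=
  ([("a", ["b", "c"]), ("b", ["a"]), ("c", []), ("d", ["a"])], "a")

def Spec_bfs (G : List (String × List String)) (start : String) (out : List (String × Option (List String))) : Prop := out = bfs_alt G start
instance (G : List (String × List String)) (start : String) (out : List (String × Option (List String))) : Decidable (Spec_bfs G start out) := by unfold Spec_bfs; infer_instance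

-- ===== CLAIM (what is proved, stated in full; the proofs are below) =====
def Claim_equal_bfs : Prop := ∀ (G : List (String × List String)) (start : String), Dom_bfs G start → Pre_bfs G start → Spec_bfs G start (bfs G start)

-- ===== LEMMAS AND PROOFS =====


-- B's reconstruction of the path of v from the parent map (exactly the expression bfs_alt stores)
def bfsSt (F : Nat) (par : PySem.Dict String (Option String)) (v : String) : Option (List String) :=
  if (par.get? v).isSome then some ("A" :: ((bfsWalk par F v).reverse.drop 1)) else none

-- the path dict A maintains, expressed from B's parent map
def mkPath (g : PySem.Dict String (List String)) (F : Nat)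
    (par : PySem.Dict String (Option String)) : PySem.Dict String (Option (List String)) :=
  g.keys.foldl (fun d v => d.insert v (bfsSt F par v)) PySem.Dict.empty

-- discovery-order invariant: every parent pointer goes to an earlier-discovered vertex
def GoodPar (L : List String) (par : PySem.Dict String (Option String)) : Prop :=
  ∀ i, (h : i < L.length) → par.get? L[i] = some none ∨
    ∃ j, ∃ hj : j < i, par.get? L[i] = some (some (L[j]'(Nat.lt_trans hj h)))

-- joint loop invariant (L = discovery order = keys of the parent map)
def InvR (g : PySem.Dict String (List String)) (L : List String) (q : List String)
    (par : PySem.Dict String (Option String)) : Prop :=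
  par.keys = L ∧ GoodPar L par ∧ L.Nodup ∧ (∀ x ∈ L, x ∈ g.keys) ∧ (∀ u ∈ q, u ∈ L)

lemma mem_iff_isSome (par : PySem.Dict String (Option String)) (L : List String)
    (hkeys : par.keys = L) (u : String) : u ∈ L ↔ (par.get? u).isSome := by
  constructor
  · intro h
    by_contra hs
    have hnone : par.get? u = none := Option.not_isSome_iff_eq_none.mp hs
    exact ((PySem.Dict.get?_eq_none_iff_not_mem_keys par u).mp hnone) (hkeys ▸ h)
  · intro h
    by_contra hmem
    have hnone : par.get? u = none :=
      (PySem.Dict.get?_eq_none_iff_not_mem_keys par u).mpr (by rw [hkeys]; exact hmem)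
    rw [hnone] at h
    exact Bool.noConfusion h

lemma parent_mem (par : PySem.Dict String (Option String)) (L : List String)
    (hg : GoodPar L par) {u p : String}
    (hu : u ∈ L) (hp : par.get? u = some (some p)) : p ∈ L := by
  obtain ⟨i, hi, rfl⟩ := List.mem_iff_getElem.mp hu
  rcases hg i hi with h1 | ⟨j, hj, h2⟩
  · rw [hp] at h1; simp at h1
  · rw [hp] at h2
    have : p = L[j]'(Nat.lt_trans hj hi) := Option.some.inj (Option.some.inj h2)
    rw [this]; exact List.getElem_mem _

lemma walk_insert_fresh (par : PySem.Dict String (Option String)) (L : List String)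
    (hg : GoodPar L par) {n : String} (hn : n ∉ L)
    (w : Option String) : ∀ f u, u ∈ L → bfsWalk (par.insert n w) f u = bfsWalk par f u := by
  intro f
  induction f with
  | zero => intro u _; rfl
  | succ f ih =>
    intro u hu
    have hne : u ≠ n := fun e => hn (e ▸ hu)
    simp only [bfsWalk]
    rw [PySem.Dict.get?_insert_of_ne par w hne]
    rcases hc : par.get? u with _ | (_ | p)
    · rfl
    · rfl
    · have hp : p ∈ L := parent_mem par L hg hu hc
      show u :: bfsWalk (par.insert n w) f p = u :: bfsWalk par f p
      rw [ih p hp]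

lemma walk_fuel (par : PySem.Dict String (Option String)) (L : List String)
    (hg : GoodPar L par) : ∀ i, (h : i < L.length) → ∀ f, i < f →
    bfsWalk par f L[i] = bfsWalk par (i + 1) L[i] := by
  intro i
  induction i using Nat.strong_induction_on with
  | _ i IH =>
    intro h f hf
    obtain ⟨f2, rfl⟩ : ∃ f2, f = f2 + 1 := ⟨f - 1, by omega⟩
    simp only [bfsWalk]
    rcases hg i h with h1 | ⟨j, hj, h2⟩
    · rw [h1]
    · rw [h2]
      have e1 := IH j hj (Nat.lt_trans hj h) f2 (by omega)
      have e2 := IH j hj (Nat.lt_trans hj h) i (by omega)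
      show L[i] :: bfsWalk par f2 (L[j]'(Nat.lt_trans hj h)) = L[i] :: bfsWalk par i (L[j]'(Nat.lt_trans hj h))
      rw [e1, e2]

lemma walk_fuel_mem (par : PySem.Dict String (Option String)) (L : List String)
    (hg : GoodPar L par) {u : String} (hu : u ∈ L) {f f' : Nat}
    (hf : L.length ≤ f) (hf' : L.length ≤ f') : bfsWalk par f u = bfsWalk par f' u := by
  obtain ⟨i, hi, rfl⟩ := List.mem_iff_getElem.mp hu
  rw [walk_fuel par L hg i hi f (Nat.lt_of_lt_of_le hi hf),
      walk_fuel par L hg i hi f' (Nat.lt_of_lt_of_le hi hf')]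

lemma walk_ne_nil (par : PySem.Dict String (Option String)) (f : Nat) (hf : 0 < f)
    (u : String) : bfsWalk par f u ≠ [] := by
  obtain ⟨f2, rfl⟩ : ∃ f2, f = f2 + 1 := ⟨f - 1, by omega⟩
  simp only [bfsWalk]
  rcases par.get? u with _ | (_ | p) <;> simp

lemma good_append (par : PySem.Dict String (Option String)) (L : List String)
    (hg : GoodPar L par) {n v : String} (hn : n ∉ L) (hv : v ∈ L) :
    GoodPar (L ++ [n]) (par.insert n (some v)) := by
  intro i h
  rw [List.length_append, List.length_singleton] at h
  by_cases hi : i < L.length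
  · have e : (L ++ [n])[i]'(by rw [List.length_append, List.length_singleton]; omega) = L[i] :=
      List.getElem_append_left hi
    rw [e]
    have hne : L[i] ≠ n := fun e2 => hn (e2 ▸ List.getElem_mem hi)
    rw [PySem.Dict.get?_insert_of_ne par _ hne]
    rcases hg i hi with h1 | ⟨j, hj, h2⟩
    · exact Or.inl h1
    · refine Or.inr ⟨j, hj, ?_⟩
      rw [List.getElem_append_left (Nat.lt_trans hj hi)]
      exact h2
  · have hieq : i = L.length := by omega
    subst hieq
    have e : (L ++ [n])[L.length]'(by simp) = n := List.getElem_concat_length rfl _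
    rw [e, PySem.Dict.get?_insert_self]
    obtain ⟨j, hjL, hjv⟩ := List.mem_iff_getElem.mp hv
    refine Or.inr ⟨j, hjL, ?_⟩
    rw [List.getElem_append_left hjL, hjv]

lemma mkPath_items (g : PySem.Dict String (List String)) (F : Nat)
    (par : PySem.Dict String (Option String)) (hnd : g.keys.Nodup) :
    (mkPath g F par).items = g.keys.map (fun k => (k, bfsSt F par k)) := by
  unfold mkPath
  have h := PySem.Dict.items_foldl_insert_fresh g.keys (fun a => a) (fun a => bfsSt F par a)
    PySem.Dict.empty (fun a _ => PySem.Dict.contains_empty a) (by simpa using hnd)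
  simpa using h

lemma mkPath_keys (g : PySem.Dict String (List String)) (F : Nat)
    (par : PySem.Dict String (Option String)) (hnd : g.keys.Nodup) :
    (mkPath g F par).keys = g.keys := by
  simp [PySem.Dict.keys, mkPath_items g F par hnd, List.map_map]

lemma mkPath_get? (g : PySem.Dict String (List String)) (F : Nat)
    (par : PySem.Dict String (Option String)) (hnd : g.keys.Nodup) {k : String}
    (hk : k ∈ g.keys) : (mkPath g F par).get? k = some (bfsSt F par k) := by
  refine PySem.Dict.get?_of_mem_items _ ?_ ?_
  · rw [mkPath_items g F par hnd]
    exact List.mem_map_of_mem hk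
  · rw [mkPath_keys g F par hnd]; exact hnd

lemma step_eq (g : PySem.Dict String (List String)) (F : Nat) (hndg : g.keys.Nodup)
    (hF : g.keys.length < F) (L q : List String) (par : PySem.Dict String (Option String))
    (v n : String) (hI : InvR g L q par) (hv : v ∈ L) (hn : n ∈ g.keys) :
    ∃ L', (∀ x ∈ L, x ∈ L') ∧
      InvR g L' (bfsStepB v (q, par) n).1 (bfsStepB v (q, par) n).2 ∧
      (bfsStepA v (q, mkPath g F par) n).1 = (bfsStepB v (q, par) n).1 ∧
      (bfsStepA v (q, mkPath g F par) n).2 = mkPath g F (bfsStepB v (q, par) n).2 := by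
  obtain ⟨hkeys, hgood, hnd, hsub, hq⟩ := hI
  obtain ⟨F2, rfl⟩ : ∃ F2, F = F2 + 1 := ⟨F - 1, by omega⟩
  have hlenL : L.length ≤ g.keys.length := (List.subperm_of_subset hnd hsub).length_le
  rcases hc : par.get? n with _ | w
  · -- n undiscovered: both enqueue it, A stores path[v] ++ [n], B stores parent n = v
    have hnL : n ∉ L := fun h => by
      have h2 := (mem_iff_isSome par L hkeys n).mp h
      rw [hc] at h2; exact Bool.noConfusion h2
    have hvS : (par.get? v).isSome := (mem_iff_isSome par L hkeys v).mp hv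
    have hB : bfsStepB v (q, par) n = (q ++ [n], par.insert n (some v)) := by
      simp [bfsStepB, hc]
    have hstn : bfsSt (F2 + 1) par n = none := by simp [bfsSt, hc]
    have hPv : bfsSt (F2 + 1) par v = some ("A" :: ((bfsWalk par (F2 + 1) v).reverse.drop 1)) := by
      simp [bfsSt, hvS]
    have hA : bfsStepA v (q, mkPath g (F2 + 1) par) n =
        (q ++ [n], (mkPath g (F2 + 1) par).insert n
          (some (("A" :: ((bfsWalk par (F2 + 1) v).reverse.drop 1)) ++ [n]))) := by
      simp [bfsStepA, mkPath_get? g (F2 + 1) par hndg hn, hstn,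
        mkPath_get? g (F2 + 1) par hndg (hsub v hv), hPv]
    have hncont : par.contains n = false := by
      rw [PySem.Dict.contains_eq_isSome_get?, hc]; rfl
    have hkeys' : (par.insert n (some v)).keys = L ++ [n] := by
      rw [PySem.Dict.keys_insert_of_not_contains par _ hncont, hkeys]
    have hgood' : GoodPar (L ++ [n]) (par.insert n (some v)) :=
      good_append par L hgood hnL hv
    have hwalkn : bfsWalk (par.insert n (some v)) (F2 + 1) n = n :: bfsWalk par (F2 + 1) v := by
      simp only [bfsWalk, PySem.Dict.get?_insert_self]
      show _ :: bfsWalk (par.insert n (some v)) F2 v = _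
      rw [walk_insert_fresh par L hgood hnL (some v) F2 v hv,
        walk_fuel_mem par L hgood hv (f := F2) (f' := F2 + 1) (by omega) (by omega)]
      rfl
    have hstn' : bfsSt (F2 + 1) (par.insert n (some v)) n =
        some (("A" :: ((bfsWalk par (F2 + 1) v).reverse.drop 1)) ++ [n]) := by
      have hW : bfsWalk par (F2 + 1) v ≠ [] := walk_ne_nil par (F2 + 1) (by omega) v
      simp only [bfsSt, PySem.Dict.get?_insert_self, Option.isSome_some, if_true]
      rw [hwalkn, List.reverse_cons,
        List.drop_append_of_le_length (by simpa using List.length_pos_of_ne_nil (by simpa using hW))]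
      rfl
    have hstk : ∀ k, k ≠ n → bfsSt (F2 + 1) (par.insert n (some v)) k = bfsSt (F2 + 1) par k := by
      intro k hkne
      by_cases hkL : k ∈ L
      · simp only [bfsSt, PySem.Dict.get?_insert_of_ne par _ hkne,
          walk_insert_fresh par L hgood hnL (some v) (F2 + 1) k hkL]
      · have hknone : par.get? k = none := Option.not_isSome_iff_eq_none.mp
          (fun hs => hkL ((mem_iff_isSome par L hkeys k).mpr hs))
        simp [bfsSt, PySem.Dict.get?_insert_of_ne par _ hkne, hknone]
    have hcont : (mkPath g (F2 + 1) par).contains n = true := by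
      rw [PySem.Dict.contains_eq_isSome_get?, mkPath_get? g (F2 + 1) par hndg hn]; rfl
    have hpath' : (mkPath g (F2 + 1) par).insert n
        (some (("A" :: ((bfsWalk par (F2 + 1) v).reverse.drop 1)) ++ [n]))
        = mkPath g (F2 + 1) (par.insert n (some v)) := by
      apply PySem.Dict.ext
      rw [PySem.Dict.items_insert_of_contains _ _ hcont, mkPath_items g _ par hndg,
        mkPath_items g _ _ hndg, List.map_map]
      apply List.map_congr_left
      intro k hk
      by_cases hkn : k = n
      · subst hkn; simp [hstn']
      · simp [hkn, hstk k hkn]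
    refine ⟨L ++ [n], fun x hx => List.mem_append_left _ hx, ?_, ?_, ?_⟩
    · rw [hB]
      refine ⟨hkeys', hgood', ?_, ?_, ?_⟩
      · simp only [List.nodup_append, List.nodup_cons, List.nodup_nil, and_true]
        refine ⟨hnd, by simp, ?_⟩
        intro a ha b hb
        rw [List.mem_singleton.mp hb]
        exact fun e => hnL (e ▸ ha)
      · intro x hx
        rcases List.mem_append.mp hx with h1 | h1
        · exact hsub x h1
        · rw [List.mem_singleton.mp h1]; exact hn
      · intro u hu
        rcases List.mem_append.mp hu with h1 | h1
        · exact List.mem_append_left _ (hq u h1)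
        · exact List.mem_append_right _ h1
    · rw [hA, hB]
    · rw [hA, hB]; exact hpath'
  · -- n already discovered: both sides skip
    have hB : bfsStepB v (q, par) n = (q, par) := by simp [bfsStepB, hc]
    have hstnS : bfsSt (F2 + 1) par n =
        some ("A" :: ((bfsWalk par (F2 + 1) n).reverse.drop 1)) := by simp [bfsSt, hc]
    have hA : bfsStepA v (q, mkPath g (F2 + 1) par) n = (q, mkPath g (F2 + 1) par) := by
      simp [bfsStepA, mkPath_get? g (F2 + 1) par hndg hn, hstnS]
    exact ⟨L, fun x hx => hx, by rw [hB]; exact ⟨hkeys, hgood, hnd, hsub, hq⟩,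
      by rw [hA, hB], by rw [hA, hB]⟩

lemma fold_eq (g : PySem.Dict String (List String)) (F : Nat) (hndg : g.keys.Nodup)
    (hF : g.keys.length < F) (v : String) :
    ∀ (ns : List String), (∀ n ∈ ns, n ∈ g.keys) →
    ∀ L q par, InvR g L q par → v ∈ L →
    ∃ L', (∀ x ∈ L, x ∈ L') ∧
      InvR g L' (ns.foldl (bfsStepB v) (q, par)).1 (ns.foldl (bfsStepB v) (q, par)).2 ∧
      (ns.foldl (bfsStepA v) (q, mkPath g F par)).1 = (ns.foldl (bfsStepB v) (q, par)).1 ∧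
      (ns.foldl (bfsStepA v) (q, mkPath g F par)).2 = mkPath g F ((ns.foldl (bfsStepB v) (q, par)).2) := by
  intro ns
  induction ns with
  | nil => exact fun _ L q par hI _ => ⟨L, fun x hx => hx, hI, rfl, rfl⟩
  | cons n ns ih =>
    intro hns L q par hI hv
    obtain ⟨L1, hmono1, hI1, hq1, hp1⟩ :=
      step_eq g F hndg hF L q par v n hI hv (hns n (List.mem_cons_self ..))
    simp only [List.foldl_cons]
    have hstate : bfsStepA v (q, mkPath g F par) n
        = ((bfsStepB v (q, par) n).1, mkPath g F (bfsStepB v (q, par) n).2) :=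
      Prod.ext hq1 hp1
    rw [hstate]
    obtain ⟨L2, hmono2, hI2, hq2, hp2⟩ :=
      ih (fun m hm => hns m (List.mem_cons_of_mem _ hm)) L1
        (bfsStepB v (q, par) n).1 (bfsStepB v (q, par) n).2 hI1 (hmono1 v hv)
    exact ⟨L2, fun x hx => hmono2 x (hmono1 x hx), hI2, hq2, hp2⟩

lemma loop_eq (g : PySem.Dict String (List String)) (F : Nat) (hndg : g.keys.Nodup)
    (hF : g.keys.length < F)
    (hPre2 : ∀ k ∈ g.keys, ∀ n ∈ g.getD k [], n ∈ g.keys) :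
    ∀ fuel (q L : List String) (par : PySem.Dict String (Option String)), InvR g L q par →
    bfsLoopA g fuel q (mkPath g F par) = mkPath g F (bfsLoopB g fuel q par) := by
  intro fuel
  induction fuel with
  | zero => intro q L par _; rfl
  | succ fuel ih =>
    intro q L par hI
    cases q with
    | nil => rfl
    | cons v q =>
      obtain ⟨hkeys, hgood, hnd, hsub, hq⟩ := hI
      have hv : v ∈ L := hq v (List.mem_cons_self ..)
      obtain ⟨L1, hmono, hI1, hq1, hp1⟩ :=
        fold_eq g F hndg hF v (g.getD v []) (hPre2 v (hsub v hv)) L q par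
          ⟨hkeys, hgood, hnd, hsub, fun u hu => hq u (List.mem_cons_of_mem _ hu)⟩ hv
      have eA : bfsLoopA g (fuel + 1) (v :: q) (mkPath g F par)
          = bfsLoopA g fuel ((g.getD v []).foldl (bfsStepA v) (q, mkPath g F par)).1
              ((g.getD v []).foldl (bfsStepA v) (q, mkPath g F par)).2 := rfl
      have eB : bfsLoopB g (fuel + 1) (v :: q) par
          = bfsLoopB g fuel ((g.getD v []).foldl (bfsStepB v) (q, par)).1
              ((g.getD v []).foldl (bfsStepB v) (q, par)).2 := rfl
      rw [eA, eB, hq1, hp1]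
      exact ih _ L1 _ hI1

-- ===== VERDICT (by name: the statement is the Claim_ definition above) =====
theorem bfs_spec : Claim_equal_bfs := by
  unfold Claim_equal_bfs
  intro G start _ hPre
  obtain ⟨hstart, hitems⟩ := hPre
  unfold Spec_bfs
  set g := PySem.Dict.ofList G with hg
  have hndg : g.keys.Nodup := PySem.Dict.nodup_keys_ofList G
  have hkeysOf : g.keys = PySem.Set.ofList (G.map Prod.fst) := by
    rw [hg]
    show (List.foldl (fun d p => d.insert p.1 p.2) PySem.Dict.empty G).keys = _
    rw [PySem.Dict.keys_foldl_insert_key G Prod.fst (fun _ p => p.2), PySem.Dict.keys_empty,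
      PySem.Set.update_nil_left]
  have hlen : g.keys.length ≤ G.length := by
    have hsub : g.keys ⊆ G.map Prod.fst := by
      rw [hkeysOf]; intro x hx; exact (PySem.Set.mem_ofList _ x).mp hx
    have h := (List.subperm_of_subset hndg hsub).length_le
    simpa using h
  have hF : g.keys.length < G.length + 1 := by omega
  have hPre2 : ∀ k ∈ g.keys, ∀ n ∈ g.getD k [], n ∈ g.keys := by
    intro k hk n hn
    rcases hck : g.get? k with _ | vs
    · exact absurd ((PySem.Dict.get?_eq_none_iff_not_mem_keys g k).mp hck) (by simp [hk])
    · have hmem := PySem.Dict.mem_items_of_get?_eq_some g hck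
      rw [PySem.Dict.getD_eq_get?_getD, hck] at hn
      exact hitems (k, vs) hmem n hn
  set par0 : PySem.Dict String (Option String) := PySem.Dict.empty.insert start none with hpar0
  have hkeys0 : par0.keys = [start] := by
    rw [hpar0, PySem.Dict.keys_insert_of_not_contains _ _ (PySem.Dict.contains_empty start),
      PySem.Dict.keys_empty, List.nil_append]
  have hget0 : par0.get? start = some none := PySem.Dict.get?_insert_self _ _ _
  have hgood0 : GoodPar [start] par0 := by
    intro i h
    have hi : i = 0 := by simpa using Nat.lt_one_iff.mp (by simpa using h)
    subst hi
    exact Or.inl hget0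
  have hI0 : InvR g [start] [start] par0 :=
    ⟨hkeys0, hgood0, List.nodup_singleton start,
      fun x hx => (List.mem_singleton.mp hx) ▸ hstart, fun u hu => hu⟩
  have hinit : ((g.keys.foldl (fun p v => p.insert v (none : Option (List String)))
        PySem.Dict.empty).insert start (some ["A"]))
      = mkPath g (G.length + 1) par0 := by
    apply PySem.Dict.ext
    have hitems0 : (g.keys.foldl (fun p v => p.insert v (none : Option (List String)))
          PySem.Dict.empty).items
        = g.keys.map (fun k => (k, (none : Option (List String)))) := by
      have h := PySem.Dict.items_foldl_insert_fresh g.keys (fun a => a)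
        (fun _ => (none : Option (List String))) PySem.Dict.empty
        (fun a _ => PySem.Dict.contains_empty a) (by simpa using hndg)
      simpa using h
    have hkeysP : (g.keys.foldl (fun p v => p.insert v (none : Option (List String)))
        PySem.Dict.empty).keys = g.keys := by
      show List.map (fun x => x.1) (g.keys.foldl (fun p v => p.insert v (none : Option (List String)))
        PySem.Dict.empty).items = g.keys
      rw [hitems0, List.map_map]
      exact List.map_id g.keys
    have hcont : (g.keys.foldl (fun p v => p.insert v (none : Option (List String)))
        PySem.Dict.empty).contains start = true := by
      rw [PySem.Dict.contains_eq_decide_mem_keys, hkeysP]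
      simpa using hstart
    rw [PySem.Dict.items_insert_of_contains _ _ hcont, hitems0,
      mkPath_items g _ par0 hndg, List.map_map]
    apply List.map_congr_left
    intro k hk
    by_cases hks : k = start
    · subst hks
      have hw : bfsWalk par0 (G.length + 1) k = [k] := by
        simp only [bfsWalk, hget0]
      have hstS : bfsSt (G.length + 1) par0 k = some ["A"] := by
        simp [bfsSt, hget0, hw]
      simp [hstS]
    · have hnone : par0.get? k = none := by
        rw [hpar0, PySem.Dict.get?_insert_of_ne _ _ hks, PySem.Dict.get?_empty]
      simp [bfsSt, hks, hnone]
  have hloop := loop_eq g (G.length + 1) hndg hF hPre2 (G.length + 1) [start] [start] par0 hI0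
  have hbfs : bfs G start = (bfsLoopA g (G.length + 1) [start]
      ((g.keys.foldl (fun p v => p.insert v (none : Option (List String)))
        PySem.Dict.empty).insert start (some ["A"]))).items := rfl
  rw [hbfs, hinit, hloop]
  rfl
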